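-- pv_equiv track=rewrite | github.com/hadoop-itmo/sketches-anfunctio | Task5.py | find_keys_w_problem
-- ===== SOURCE A (Python) =====
-- KEY_THRESHOLD = 60000
--
-- def find_keys_w_problem(counts_file1, counts_file2):
--     problematic_keys = set()
--
--     for key, count in counts_file1.items():
--         if count > KEY_THRESHOLD or counts_file2.get(key, 0) > KEY_THRESHOLD:
--             problematic_keys.add(key)
--
--     for key, count in counts_file2.items():
--         if key not in counts_file1 and count > KEY_THRESHOLD:
--             problematic_keys.add(key)
--
--     return problematic_keys
-- ===== SOURCE B (Python) =====
-- KEY_THRESHOLD = 60000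
--
-- def find_keys_w_problem(counts_file1, counts_file2):
--     merged = dict(counts_file1)
--     for key, count in counts_file2.items():
--         merged[key] = max(count, merged.get(key, count))
--     return {key for key, count in merged.items() if count > KEY_THRESHOLD}
-- ===== Notes on version B (the rewrite author's own statement) =====
-- stated objective: simpler
-- what changed: Instead of A's two coupled filtered passes (with a cross-dict .get disjunction and a 'not in counts_file1' membership guard), B builds a single pointwise-max merged counter from both dicts and applies one threshold filter to it.
import Mathlib
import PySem

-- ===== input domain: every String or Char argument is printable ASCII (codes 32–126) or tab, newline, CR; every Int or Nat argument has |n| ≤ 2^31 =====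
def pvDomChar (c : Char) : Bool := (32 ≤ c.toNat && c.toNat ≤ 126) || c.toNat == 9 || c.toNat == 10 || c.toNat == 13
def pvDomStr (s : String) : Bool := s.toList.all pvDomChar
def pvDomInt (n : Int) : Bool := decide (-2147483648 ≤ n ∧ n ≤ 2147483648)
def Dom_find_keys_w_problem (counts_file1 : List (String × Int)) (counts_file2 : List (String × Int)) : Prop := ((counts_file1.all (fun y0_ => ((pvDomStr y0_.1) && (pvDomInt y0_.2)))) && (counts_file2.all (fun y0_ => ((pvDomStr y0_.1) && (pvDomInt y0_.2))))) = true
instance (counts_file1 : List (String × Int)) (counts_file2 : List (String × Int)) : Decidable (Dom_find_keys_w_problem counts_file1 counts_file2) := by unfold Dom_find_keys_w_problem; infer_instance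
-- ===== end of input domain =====

-- B replaces A's two coupled filtered passes by a pointwise-max merged counter
-- followed by one threshold filter; objective: simpler.

-- ===== PORT A =====
def KEY_THRESHOLD : Int := 60000

def find_keys_w_problem (counts_file1 : List (String × Int)) (counts_file2 : List (String × Int)) : List String :=
  let d1 := PySem.Dict.ofList counts_file1
  let d2 := PySem.Dict.ofList counts_file2
  -- for key, count in counts_file1.items(): if count > T or counts_file2.get(key, 0) > T
  let s1 : PySem.Set String :=
    d1.items.foldl (fun s p =>
      if p.2 > KEY_THRESHOLD ∨ d2.getD p.1 0 > KEY_THRESHOLD then PySem.Set.add s p.1 else s)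
      PySem.Set.empty
  -- for key, count in counts_file2.items(): if key not in counts_file1 and count > T
  d2.items.foldl (fun s p =>
    if ¬ d1.contains p.1 = true ∧ p.2 > KEY_THRESHOLD then PySem.Set.add s p.1 else s) s1

-- ===== PORT B =====
def find_keys_w_problem_alt (counts_file1 : List (String × Int)) (counts_file2 : List (String × Int)) : List String :=
  -- merged = dict(counts_file1); for key, count in counts_file2.items(): merged[key] = max(count, merged.get(key, count))
  let merged : PySem.Dict String Int :=
    (PySem.Dict.ofList counts_file2).items.foldl
      (fun m p => m.insert p.1 (max p.2 (m.getD p.1 p.2)))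
      (PySem.Dict.ofList counts_file1)
  -- {key for key, count in merged.items() if count > KEY_THRESHOLD}
  PySem.Set.ofList ((merged.items.filter (fun p => decide (p.2 > KEY_THRESHOLD))).map (·.1))

-- ===== PRECONDITION & SPEC =====
def Spec_find_keys_w_problem (counts_file1 : List (String × Int)) (counts_file2 : List (String × Int)) (out : List String) : Prop := out = find_keys_w_problem_alt counts_file1 counts_file2
instance (counts_file1 : List (String × Int)) (counts_file2 : List (String × Int)) (out : List String) : Decidable (Spec_find_keys_w_problem counts_file1 counts_file2 out) := by unfold Spec_find_keys_w_problem; infer_instance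

-- ===== CLAIM (what is proved, stated in full; the proofs are below) =====
def Claim_equal_find_keys_w_problem : Prop := ∀ (counts_file1 : List (String × Int)) (counts_file2 : List (String × Int)), Dom_find_keys_w_problem counts_file1 counts_file2 → Spec_find_keys_w_problem counts_file1 counts_file2 (find_keys_w_problem counts_file1 counts_file2)

-- ===== LEMMAS AND PROOFS =====

-- Keys of a filtered items list, for a dict with Nodup keys, are the filtered keys.
theorem itemsFilterMap (d : PySem.Dict String Int) (h : d.keys.Nodup) (c : String × Int → Bool) :
    (d.items.filter c).map (·.1) = d.keys.filter (fun k => c (k, d.getD k 0)) := by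
  rw [PySem.Dict.items_eq_map_keys d h 0, List.filter_map]
  simp [Function.comp_def]

-- A conditional add-to-set loop over pairs with fresh, distinct keys appends the filtered keys.
theorem addloop (c : String × Int → Prop) [DecidablePred c] :
    ∀ (l : List (String × Int)) (s : List String),
      ((l.filter (fun p => decide (c p))).map (·.1)).Nodup →
      (∀ p ∈ l, c p → p.1 ∉ s) →
      l.foldl (fun s p => if c p then PySem.Set.add s p.1 else s) s
        = s ++ (l.filter (fun p => decide (c p))).map (·.1) := by
  intro l
  induction l with
  | nil => intro s _ _; simp
  | cons p l ih =>
    intro s hnd hfresh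
    by_cases hc : c p
    · have hfilter : (p :: l).filter (fun q => decide (c q)) = p :: l.filter (fun q => decide (c q)) := by
        simp [hc]
      rw [hfilter] at hnd ⊢
      simp only [List.map_cons] at hnd ⊢
      have hnd' := List.nodup_cons.mp hnd
      have hnotmem : p.1 ∉ s := hfresh p (List.mem_cons_self) hc
      have hstep : (p :: l).foldl (fun s q => if c q then PySem.Set.add s q.1 else s) s
          = l.foldl (fun s q => if c q then PySem.Set.add s q.1 else s) (s ++ [p.1]) := by
        simp [PySem.Set.add_of_not_mem hnotmem, hc]
      rw [hstep, ih (s ++ [p.1]) hnd'.2]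
      · simp
      · intro q hq hcq
        simp only [List.mem_append, List.mem_singleton]
        push Not
        refine ⟨hfresh q (List.mem_cons_of_mem _ hq) hcq, ?_⟩
        intro hqp
        exact hnd'.1 (by
          rw [← hqp]
          exact List.mem_map_of_mem (List.mem_filter.mpr ⟨hq, by simp [hcq]⟩))
    · have hfilter : (p :: l).filter (fun q => decide (c q)) = l.filter (fun q => decide (c q)) := by
        simp [hc]
      rw [hfilter] at hnd ⊢
      simp only [List.foldl_cons, if_neg hc]
      exact ih s hnd (fun q hq hcq => hfresh q (List.mem_cons_of_mem _ hq) hcq)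

-- the max-merge fold leaves keys it never sees alone
theorem mergeUntouched (k : String) :
    ∀ (l : List (String × Int)) (d : PySem.Dict String Int), k ∉ l.map (·.1) →
      (l.foldl (fun m p => m.insert p.1 (max p.2 (m.getD p.1 p.2))) d).getD k 0 = d.getD k 0 := by
  intro l
  induction l with
  | nil => intro d _; rfl
  | cons p l ih =>
    intro d hk
    simp only [List.map_cons, List.mem_cons] at hk
    push Not at hk
    simp only [List.foldl_cons]
    rw [ih _ hk.2, PySem.Dict.getD_insert_of_ne _ _ _ hk.1]

-- the max-merge fold at a key it sees once returns max of the two values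
theorem mergeHit (k : String) (v : Int) :
    ∀ (l : List (String × Int)) (d : PySem.Dict String Int), (l.map (·.1)).Nodup → (k, v) ∈ l →
      (l.foldl (fun m p => m.insert p.1 (max p.2 (m.getD p.1 p.2))) d).getD k 0
        = max v (d.getD k v) := by
  intro l
  induction l with
  | nil => intro d _ h; simp at h
  | cons p l ih =>
    intro d hnd hmem
    simp only [List.map_cons, List.nodup_cons] at hnd
    simp only [List.foldl_cons]
    rcases List.mem_cons.mp hmem with heq | htail
    · subst heq
      rw [mergeUntouched k l _ hnd.1, PySem.Dict.getD_insert_self]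
    · have hne : p.1 ≠ k := by
        intro h
        exact hnd.1 (h ▸ List.mem_map_of_mem htail)
      rw [ih _ hnd.2 htail, PySem.Dict.getD_insert_of_ne _ _ _ (Ne.symm hne)]

theorem find_keys_w_problem_eq (counts_file1 counts_file2 : List (String × Int)) :
    find_keys_w_problem counts_file1 counts_file2
      = find_keys_w_problem_alt counts_file1 counts_file2 := by
  simp only [find_keys_w_problem, find_keys_w_problem_alt]
  set d1 := PySem.Dict.ofList counts_file1 with hd1
  set d2 := PySem.Dict.ofList counts_file2 with hd2
  have hk1 : d1.keys.Nodup := PySem.Dict.nodup_keys_ofList counts_file1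
  have hk2 : d2.keys.Nodup := PySem.Dict.nodup_keys_ofList counts_file2
  set merged := d2.items.foldl (fun m p => m.insert p.1 (max p.2 (m.getD p.1 p.2))) d1 with hmerged
  -- ===== A as an explicit append of two filtered key lists =====
  have hL1 : d1.items.foldl (fun s p =>
        if p.2 > KEY_THRESHOLD ∨ d2.getD p.1 0 > KEY_THRESHOLD then PySem.Set.add s p.1 else s)
        PySem.Set.empty
      = (d1.items.filter (fun p => decide (p.2 > KEY_THRESHOLD ∨ d2.getD p.1 0 > KEY_THRESHOLD))).map (·.1) := by
    have := addloop (fun p : String × Int => p.2 > KEY_THRESHOLD ∨ d2.getD p.1 0 > KEY_THRESHOLD)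
      d1.items PySem.Set.empty
      (by rw [itemsFilterMap d1 hk1 _]; exact hk1.filter _)
      (by intro p _ _ h; simp [PySem.Set.empty] at h)
    simpa [PySem.Set.empty] using this
  have hL1keys : (d1.items.filter (fun p => decide (p.2 > KEY_THRESHOLD ∨ d2.getD p.1 0 > KEY_THRESHOLD))).map (·.1)
      = d1.keys.filter (fun k => decide (d1.getD k 0 > KEY_THRESHOLD ∨ d2.getD k 0 > KEY_THRESHOLD)) :=
    itemsFilterMap d1 hk1 _
  have hL2 : d2.items.foldl (fun s p =>
        if ¬ d1.contains p.1 = true ∧ p.2 > KEY_THRESHOLD then PySem.Set.add s p.1 else s)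
        ((d1.items.filter (fun p => decide (p.2 > KEY_THRESHOLD ∨ d2.getD p.1 0 > KEY_THRESHOLD))).map (·.1))
      = (d1.items.filter (fun p => decide (p.2 > KEY_THRESHOLD ∨ d2.getD p.1 0 > KEY_THRESHOLD))).map (·.1)
        ++ (d2.items.filter (fun p => decide (¬ d1.contains p.1 = true ∧ p.2 > KEY_THRESHOLD))).map (·.1) := by
    apply addloop (fun p : String × Int => ¬ d1.contains p.1 = true ∧ p.2 > KEY_THRESHOLD)
    · rw [itemsFilterMap d2 hk2 _]; exact hk2.filter _
    · intro p _ hc hmem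
      rw [hL1keys] at hmem
      exact hc.1 ((PySem.Dict.contains_iff_mem_keys d1 p.1).mpr (List.mem_filter.mp hmem).1)
  rw [hL1, hL2, hL1keys]
  have hL2keys : (d2.items.filter (fun p => decide (¬ d1.contains p.1 = true ∧ p.2 > KEY_THRESHOLD))).map (·.1)
      = d2.keys.filter (fun k => decide (¬ d1.contains k = true ∧ d2.getD k 0 > KEY_THRESHOLD)) :=
    itemsFilterMap d2 hk2 _
  rw [hL2keys]
  -- ===== B: the merged dict's keys and values =====
  have hmk : merged.keys = PySem.Set.update d1.keys (d2.items.map (·.1)) :=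
    PySem.Dict.keys_foldl_insert_key d2.items (·.1) (fun m p => max p.2 (m.getD p.1 p.2)) d1
  have hmkeys : merged.keys
      = d1.keys ++ d2.keys.filter (fun k => !(PySem.Set.contains d1.keys k)) := by
    rw [hmk, PySem.Set.update_eq_append_filter]
    congr 1
    rw [show d2.items.map (·.1) = d2.keys from rfl, PySem.Set.ofList_eq_self_of_nodup _ hk2]
  have hmnd : merged.keys.Nodup :=
    PySem.Dict.nodup_keys_foldl_insert_key d2.items (·.1) _ d1 hk1
  -- value of merged at present-in-d2 keys
  have hval2 : ∀ k ∈ d2.keys, merged.getD k 0 = max (d2.getD k 0) (d1.getD k (d2.getD k 0)) := by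
    intro k hk
    obtain ⟨p, hp, hp1⟩ := List.mem_map.mp hk
    obtain ⟨k', v⟩ := p
    cases hp1
    have hv : d2.getD k' 0 = v :=
      PySem.Dict.getD_of_mem_items d2 hp hk2 0
    rw [hv]
    exact mergeHit k' v d2.items d1 hk2 hp
  -- value of merged at keys absent from d2
  have hval1 : ∀ k, k ∉ d2.keys → merged.getD k 0 = d1.getD k 0 := by
    intro k hk
    exact mergeUntouched k d2.items d1 hk
  have hBkeys : (merged.items.filter (fun p => decide (p.2 > KEY_THRESHOLD))).map (·.1)
      = merged.keys.filter (fun k => decide (merged.getD k 0 > KEY_THRESHOLD)) :=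
    itemsFilterMap merged hmnd _
  rw [hBkeys, PySem.Set.ofList_eq_self_of_nodup _ (by rw [hBkeys] at *; exact hmnd.filter _),
      hmkeys, List.filter_append, List.filter_filter]
  -- first block: over d1.keys the merged condition is A's disjunction
  have hfirst : d1.keys.filter (fun k => decide (merged.getD k 0 > KEY_THRESHOLD))
      = d1.keys.filter (fun k => decide (d1.getD k 0 > KEY_THRESHOLD ∨ d2.getD k 0 > KEY_THRESHOLD)) := by
    apply List.filter_congr
    intro k hk
    obtain ⟨p, hp, hp1⟩ := List.mem_map.mp hk
    obtain ⟨k', w⟩ := p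
    cases hp1
    have hw : ∀ dflt : Int, d1.getD k' dflt = w := by
      intro dflt
      rw [PySem.Dict.getD_eq_get?_getD, PySem.Dict.get?_of_mem_items d1 hp hk1]
      rfl
    by_cases h2 : k' ∈ d2.keys
    · rw [hval2 k' h2, hw (d2.getD k' 0), hw 0]
      simp only [decide_eq_decide]
      omega
    · rw [hval1 k' h2, hw 0]
      have hz : d2.getD k' 0 = 0 := by
        rw [PySem.Dict.getD_eq_get?_getD, (PySem.Dict.get?_eq_none_iff_not_mem_keys d2 k').mpr h2]
        rfl
      rw [hz]
      simp only [decide_eq_decide, KEY_THRESHOLD]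
      omega
  -- second block: over d2-only keys the merged value is d2's value
  have hsecond : d2.keys.filter (fun k =>
        decide (merged.getD k 0 > KEY_THRESHOLD) && !(PySem.Set.contains d1.keys k))
      = d2.keys.filter (fun k => decide (¬ d1.contains k = true ∧ d2.getD k 0 > KEY_THRESHOLD)) := by
    apply List.filter_congr
    intro k hk
    have hc : d1.contains k = PySem.Set.contains d1.keys k := by
      simp [PySem.Dict.contains_eq_decide_mem_keys, PySem.Set.contains_eq_listContains]
    by_cases h1 : k ∈ d1.keys
    · simp [PySem.Set.contains_eq_listContains, h1, hc]
    · have hval : merged.getD k 0 = d2.getD k 0 := by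
        rw [hval2 k hk]
        have : d1.getD k (d2.getD k 0) = d2.getD k 0 := by
          rw [PySem.Dict.getD_eq_get?_getD, (PySem.Dict.get?_eq_none_iff_not_mem_keys d1 k).mpr h1]
          rfl
        rw [this]
        omega
      simp [PySem.Set.contains_eq_listContains, h1, hc, hval]
  rw [hfirst, hsecond]

-- ===== VERDICT (by name: the statement is the Claim_ definition above) =====
theorem find_keys_w_problem_spec : Claim_equal_find_keys_w_problem := by
  intro counts_file1 counts_file2 _
  unfold Spec_find_keys_w_problem
  exact find_keys_w_problem_eq counts_file1 counts_file2
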